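-- pv_equiv track=rewrite | github.com/Stikinit/keyforge-deck-evaluation | raw_ds_builder.py | tokenize_cards_rows
-- ===== SOURCE A (Python) =====
-- def tokenize_cards_rows(cards):
--     """Organizes raw card info in a tokenizable way for future operations
--
--     Returns: a complete dataset row
--    """
--     res_row = ''
--     initial_tokens = [ t for t in cards.split('~') if t]    # Avoid empty tokens
--     final_tokens = []
--     for t in initial_tokens:
--         if t.endswith('1'):
--             t = t[:len(t)-1] + '|'
--             final_tokens.append(t)
--         elif t.endswith('12'):
--             t = t[:len(t)-2] + '|' + t[:len(t)-2] + '|'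
--             final_tokens.append(t)
--         elif t.endswith('123'):
--             t = t[:len(t)-3] + '|' + t[:len(t)-3] + '|' + t[:len(t)-3] + '|'
--             final_tokens.append(t)
--         elif t.endswith('1234'):
--             t = t[:len(t)-4] + '|' + t[:len(t)-4] + '|' + t[:len(t)-4] + '|' + t[:len(t)-4] + '|'
--             final_tokens.append(t)
--         elif t.endswith('12345'):
--             t = t[:len(t)-5] + '|' + t[:len(t)-5] + '|' + t[:len(t)-5] + '|' + t[:len(t)-5] + '|' + t[:len(t)-5] + '|'
--             final_tokens.append(t)
--         elif t.endswith('123456'):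
--             t = t[:len(t)-6] + '|' + t[:len(t)-6] + '|' + t[:len(t)-6] + '|' + t[:len(t)-6] + '|' + t[:len(t)-6] + '|' + t[:len(t)-6] + '|'
--             final_tokens.append(t)
--         elif t.endswith('1234567'):
--             t = t[:len(t)-7] + '|' + t[:len(t)-7] + '|' + t[:len(t)-7] + '|' + t[:len(t)-7] + '|' + t[:len(t)-7] + '|' + t[:len(t)-7] + '|' + t[:len(t)-7] + '|'
--             final_tokens.append(t)
--     res_row = ''.join(final_tokens)
--     res_row = res_row[:len(res_row)-1]
--     return res_row
-- ===== SOURCE B (Python) =====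
-- def tokenize_cards_rows(cards):
--     """Organizes raw card info in a tokenizable way for future operations
--
--     Returns: a complete dataset row
--     """
--     stems = []
--     buf = []
--     for ch in cards + '~':
--         if ch == '~':
--             t = ''.join(buf)
--             buf = []
--             if t:
--                 d = ord(t[-1]) - 48
--                 if 1 <= d <= 7 and t[-d:] == '1234567'[:d]:
--                     stems.extend([t[:-d]] * d)
--         else:
--             buf.append(ch)
--     return '|'.join(stems)
-- ===== Notes on version B (the rewrite author's own statement) =====
-- stated objective: alternative
-- what changed: B is a single character-level scan: no call to split, no seven-branch endswith ladder and no trailing-separator strip - it accumulates a buffer until each tilde separator, derives the replication count from the token's last character with one suffix comparison, collects a flat list of stems, and emits the row with a pipe-separated join.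
import Mathlib
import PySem

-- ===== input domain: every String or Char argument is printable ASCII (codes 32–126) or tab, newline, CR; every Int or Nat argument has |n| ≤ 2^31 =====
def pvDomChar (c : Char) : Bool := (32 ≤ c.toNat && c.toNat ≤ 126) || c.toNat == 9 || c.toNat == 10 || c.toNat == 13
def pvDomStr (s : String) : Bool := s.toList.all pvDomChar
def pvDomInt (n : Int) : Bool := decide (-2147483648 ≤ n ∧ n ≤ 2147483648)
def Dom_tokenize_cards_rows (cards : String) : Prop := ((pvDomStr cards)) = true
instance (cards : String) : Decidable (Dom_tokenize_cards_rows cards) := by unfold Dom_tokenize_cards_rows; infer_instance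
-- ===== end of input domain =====

-- B replaces A's split + seven-branch endswith ladder + strip-last-char by a single
-- character-level scan (buffer accumulated until the separator, count read off the token's
-- last character, flat stem list emitted via a separator join); objective: alternative decomposition.

-- ===== PORT A =====
-- loop body of A's `for t in initial_tokens` (the unrolled 7-branch ladder, appending to final_tokens)
def tokenize_stepA (acc : List (List Char)) (t : List Char) : List (List Char) :=
  if PySem.Chars.endswith t ['1'] then
    acc ++ [PySem.List.slice t none (some ((t.length : Int) - 1)) ++ ['|']]
  else if PySem.Chars.endswith t ['1', '2'] then
    let p := PySem.List.slice t none (some ((t.length : Int) - 2))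
    acc ++ [p ++ ['|'] ++ p ++ ['|']]
  else if PySem.Chars.endswith t ['1', '2', '3'] then
    let p := PySem.List.slice t none (some ((t.length : Int) - 3))
    acc ++ [p ++ ['|'] ++ p ++ ['|'] ++ p ++ ['|']]
  else if PySem.Chars.endswith t ['1', '2', '3', '4'] then
    let p := PySem.List.slice t none (some ((t.length : Int) - 4))
    acc ++ [p ++ ['|'] ++ p ++ ['|'] ++ p ++ ['|'] ++ p ++ ['|']]
  else if PySem.Chars.endswith t ['1', '2', '3', '4', '5'] then
    let p := PySem.List.slice t none (some ((t.length : Int) - 5))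
    acc ++ [p ++ ['|'] ++ p ++ ['|'] ++ p ++ ['|'] ++ p ++ ['|'] ++ p ++ ['|']]
  else if PySem.Chars.endswith t ['1', '2', '3', '4', '5', '6'] then
    let p := PySem.List.slice t none (some ((t.length : Int) - 6))
    acc ++ [p ++ ['|'] ++ p ++ ['|'] ++ p ++ ['|'] ++ p ++ ['|'] ++ p ++ ['|'] ++ p ++ ['|']]
  else if PySem.Chars.endswith t ['1', '2', '3', '4', '5', '6', '7'] then
    let p := PySem.List.slice t none (some ((t.length : Int) - 7))
    acc ++ [p ++ ['|'] ++ p ++ ['|'] ++ p ++ ['|'] ++ p ++ ['|'] ++ p ++ ['|'] ++ p ++ ['|'] ++ p ++ ['|']]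
  else acc

def tokenize_cards_rows (cards : String) : String :=
  let initial_tokens := (PySem.Chars.splitOn cards.toList ['~']).filter (fun t => !t.isEmpty)
  let final_tokens := initial_tokens.foldl tokenize_stepA []
  let res := PySem.Chars.join [] final_tokens
  String.ofList (PySem.List.slice res none (some ((res.length : Int) - 1)))

-- ===== PORT B =====
-- body of Source B's `if ch == '~':` branch: flush the buffer as one token, extend stems
def tokenize_emitB (stems : List (List Char)) (t : List Char) : List (List Char) :=
  if t.isEmpty then stems
  else
    match PySem.List.pyGet? t (-1) with
    | none => stems   -- unreachable: t is nonempty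
    | some c =>
      let d : Int := (c.toNat : Int) - 48
      if 1 ≤ d ∧ d ≤ 7 then
        if PySem.List.slice t (some (-d)) none = PySem.List.slice ("1234567".toList) none (some d) then
          stems ++ List.replicate d.toNat (PySem.List.slice t none (some (-d)))
        else stems
      else stems

-- body of Source B's `for ch in cards + '~'` loop, state = (buf, stems)
def tokenize_stepB (st : List Char × List (List Char)) (ch : Char) : List Char × List (List Char) :=
  if ch = '~' then ([], tokenize_emitB st.2 st.1) else (st.1 ++ [ch], st.2)

def tokenize_cards_rows_alt (cards : String) : String :=
  let st := (cards.toList ++ ['~']).foldl tokenize_stepB ([], [])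
  String.ofList (PySem.Chars.join ['|'] st.2)

-- ===== PRECONDITION & SPEC =====
def Spec_tokenize_cards_rows (cards : String) (out : String) : Prop := out = tokenize_cards_rows_alt cards
instance (cards : String) (out : String) : Decidable (Spec_tokenize_cards_rows cards out) := by unfold Spec_tokenize_cards_rows; infer_instance

-- ===== CLAIM (what is proved, stated in full; the proofs are below) =====
def Claim_equal_tokenize_cards_rows : Prop := ∀ (cards : String), Dom_tokenize_cards_rows cards → Spec_tokenize_cards_rows cards (tokenize_cards_rows cards)

-- ===== LEMMAS AND PROOFS =====

-- clean structural recursion equivalent to Python's split('~')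
def splitT : List Char → List Char → List (List Char)
  | buf, [] => [buf]
  | buf, c :: rest => if c = '~' then buf :: splitT [] rest else splitT (buf ++ [c]) rest

theorem go_eq_splitT (fuel : Nat) : ∀ (l cur : List Char) (acc : List (List Char)),
    l.length < fuel →
    PySem.Chars.splitOn.go ['~'] fuel l cur acc = acc.reverse ++ splitT cur.reverse l := by
  induction fuel with
  | zero => intro l cur acc h; omega
  | succ n ih =>
    intro l cur acc h
    cases l with
    | nil => simp [PySem.Chars.splitOn.go, splitT]
    | cons c rest =>
      by_cases hc : c = '~'
      · subst hc
        rw [PySem.Chars.splitOn.go]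
        simp only [List.isPrefixOf, BEq.rfl, Bool.true_and, if_true, List.length_cons,
          List.drop_succ_cons, List.length_nil, List.drop_zero]
        rw [ih rest [] (cur.reverse :: acc) (by simpa using Nat.lt_of_succ_lt_succ h)]
        simp [splitT]
      · rw [PySem.Chars.splitOn.go]
        have : (['~'].isPrefixOf (c :: rest)) = false := by
          simp [List.isPrefixOf]; exact fun hcontra => hc hcontra.symm
        rw [this]
        simp only [Bool.false_eq_true, if_false]
        rw [ih rest (c :: cur) acc (by simpa using Nat.lt_of_succ_lt_succ h)]
        simp [splitT, hc]

theorem splitOn_eq_splitT (s : List Char) :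
    PySem.Chars.splitOn s ['~'] = splitT [] s := by
  have := go_eq_splitT (s.length + 1) s [] [] (by omega)
  simpa [PySem.Chars.splitOn] using this

-- the scan of B processes exactly the tokens of splitT
theorem scan_eq_splitT (l : List Char) : ∀ (buf : List Char) (stems : List (List Char)),
    ((l ++ ['~']).foldl tokenize_stepB (buf, stems)).2 =
      (splitT buf l).foldl tokenize_emitB stems := by
  induction l with
  | nil => intro buf stems; simp [tokenize_stepB, splitT]
  | cons c rest ih =>
    intro buf stems
    by_cases hc : c = '~'
    · subst hc
      simp only [List.cons_append, List.foldl_cons, tokenize_stepB, if_pos rfl, splitT,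
        List.foldl_cons]
      exact ih [] (tokenize_emitB stems buf)
    · simp only [List.cons_append, List.foldl_cons, tokenize_stepB, if_neg hc, splitT]
      exact ih (buf ++ [c]) stems

theorem emitB_append (stems : List (List Char)) (t : List Char) :
    tokenize_emitB stems t = stems ++ tokenize_emitB [] t := by
  unfold tokenize_emitB
  by_cases h1 : t.isEmpty
  · simp [h1]
  · simp only [h1, Bool.false_eq_true, if_false]
    cases hg : PySem.List.pyGet? t (-1) with
    | none => simp
    | some c => dsimp only; split_ifs <;> simp

theorem stepA_append (acc : List (List Char)) (t : List Char) :
    tokenize_stepA acc t = acc ++ tokenize_stepA [] t := by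
  unfold tokenize_stepA
  split_ifs <;> simp

theorem pyGet_last (t : List Char) (h : t ≠ []) : PySem.List.pyGet? t (-1) = t.getLast? := by
  simp [PySem.List.pyGet?, PySem.List.pyIdx?]
  have h1 : 1 ≤ t.length := List.length_pos_iff.mpr h
  simp [h1, List.getLast?_eq_getElem?]

theorem endswith_getLast (t p : List Char) (hp : p ≠ []) (h : PySem.Chars.endswith t p = true) :
    t.getLast? = p.getLast? := by
  simp only [PySem.Chars.endswith, List.isSuffixOf_iff_suffix] at h
  obtain ⟨u, rfl⟩ := h
  exact List.getLast?_append_of_ne_nil u hp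

theorem not_endswith (t p : List Char) (c c' : Char) (ht : t.getLast? = some c)
    (hp : p.getLast? = some c') (hne : c ≠ c') : PySem.Chars.endswith t p = false := by
  by_contra h
  have h' : PySem.Chars.endswith t p = true := by
    cases hE : PySem.Chars.endswith t p <;> simp_all
  have := endswith_getLast t p (by rintro rfl; simp at hp) h'
  rw [ht, hp] at this
  exact hne (by injection this)

theorem endswith_le (t p : List Char) (h : PySem.Chars.endswith t p = true) :
    p.length ≤ t.length := by
  simp only [PySem.Chars.endswith, List.isSuffixOf_iff_suffix] at h
  exact h.length_le

theorem char_of_toNat (a b : Char) (h : a.toNat = b.toNat) : a = b := by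
  apply Char.ext; exact UInt32.toNat_inj.mp h

theorem slice_take (t : List Char) (d : Nat) (hle : d ≤ t.length) :
    PySem.List.slice t none (some ((t.length : Int) - (d : Int))) = t.take (t.length - d) := by
  have : (t.length : Int) - (d : Int) = ((t.length - d : Nat) : Int) := by omega
  rw [this, PySem.List.slice_to_natCast]

-- endswith via the length-k suffix slice
theorem endswith_iff_drop (t p : List Char) (hp : p ≠ []) :
    PySem.Chars.endswith t p = true ↔ t.drop (t.length - p.length) = p := by
  rw [PySem.Chars.endswith_iff, List.suffix_iff_eq_drop]
  exact ⟨fun h => h.symm, fun h => h.symm⟩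

-- per-token agreement of the two loop bodies, up to flattening
theorem tokflat (t : List Char) :
    (if !t.isEmpty then tokenize_stepA [] t else []).flatten =
      ((tokenize_emitB [] t).map (· ++ ['|'])).flatten := by
  by_cases ht : t = []
  · subst ht; simp [tokenize_emitB]
  · have hne : t.isEmpty = false := by simp [ht]
    obtain ⟨c, hlast⟩ : ∃ c, t.getLast? = some c :=
      ⟨t.getLast ht, List.getLast?_eq_some_getLast ht⟩
    simp only [hne, Bool.not_false, if_pos]
    unfold tokenize_emitB
    simp only [hne, Bool.false_eq_true, if_false, pyGet_last t ht, hlast]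
    by_cases hr : '1' ≤ c ∧ c ≤ '7'
    · have hlo : 49 ≤ c.toNat := hr.1
      have hhi : c.toNat ≤ 55 := hr.2
      have hcases : c.toNat = 49 ∨ c.toNat = 50 ∨ c.toNat = 51 ∨ c.toNat = 52 ∨
          c.toNat = 53 ∨ c.toNat = 54 ∨ c.toNat = 55 := by omega
      have hdig : c = '1' ∨ c = '2' ∨ c = '3' ∨ c = '4' ∨ c = '5' ∨ c = '6' ∨ c = '7' := by
        rcases hcases with h | h | h | h | h | h | h
        · exact Or.inl (char_of_toNat c '1' h)
        · exact Or.inr (Or.inl (char_of_toNat c '2' h))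
        · exact Or.inr (Or.inr (Or.inl (char_of_toNat c '3' h)))
        · exact Or.inr (Or.inr (Or.inr (Or.inl (char_of_toNat c '4' h))))
        · exact Or.inr (Or.inr (Or.inr (Or.inr (Or.inl (char_of_toNat c '5' h)))))
        · exact Or.inr (Or.inr (Or.inr (Or.inr (Or.inr (Or.inl (char_of_toNat c '6' h))))))
        · exact Or.inr (Or.inr (Or.inr (Or.inr (Or.inr (Or.inr (char_of_toNat c '7' h))))))
      rcases hdig with rfl | rfl | rfl | rfl | rfl | rfl | rfl
      · -- c = '1'
        rw [show (('1'.toNat : Int) - 48) = ((1 : Nat) : Int) from by decide]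
        rw [if_pos (show (1:Int) ≤ ((1:Nat):Int) ∧ ((1:Nat):Int) ≤ 7 from by norm_num)]
        rw [PySem.List.slice_from_neg_natCast t 1 (by norm_num),
          PySem.List.slice_to_neg_natCast t 1 (by norm_num),
          show PySem.List.slice "1234567".toList none (some ((1:Nat):Int)) = ['1'] from by decide,
          Int.toNat_natCast]
        by_cases hE : PySem.Chars.endswith t ['1'] = true
        · have hdrop : t.drop (t.length - 1) = ['1'] := by
            simpa using (endswith_iff_drop t ['1'] (by decide)).mp hE
          rw [if_pos hdrop]
          have hlen : 1 ≤ t.length := by simpa using endswith_le t ['1'] hE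
          have hs1 : PySem.List.slice t none (some ((t.length : Int) - 1)) = t.take (t.length - 1) := by
            have h := slice_take t 1 hlen; push_cast at h; exact h
          simp only [tokenize_stepA, hE, hs1,
            not_endswith t ['1', '2'] '1' '2' hlast rfl (by decide),
            not_endswith t ['1', '2', '3'] '1' '3' hlast rfl (by decide),
            not_endswith t ['1', '2', '3', '4'] '1' '4' hlast rfl (by decide),
            not_endswith t ['1', '2', '3', '4', '5'] '1' '5' hlast rfl (by decide),
            not_endswith t ['1', '2', '3', '4', '5', '6'] '1' '6' hlast rfl (by decide),
            not_endswith t ['1', '2', '3', '4', '5', '6', '7'] '1' '7' hlast rfl (by decide)]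
          simp [List.replicate]
        · rw [Bool.not_eq_true] at hE
          have hdropne : ¬ (t.drop (t.length - 1) = ['1']) := by
            intro hcontra
            have : PySem.Chars.endswith t ['1'] = true :=
              (endswith_iff_drop t ['1'] (by decide)).mpr (by simpa using hcontra)
            simp [this] at hE
          rw [if_neg hdropne]
          simp only [tokenize_stepA, hE,
            not_endswith t ['1', '2'] '1' '2' hlast rfl (by decide),
            not_endswith t ['1', '2', '3'] '1' '3' hlast rfl (by decide),
            not_endswith t ['1', '2', '3', '4'] '1' '4' hlast rfl (by decide),
            not_endswith t ['1', '2', '3', '4', '5'] '1' '5' hlast rfl (by decide),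
            not_endswith t ['1', '2', '3', '4', '5', '6'] '1' '6' hlast rfl (by decide),
            not_endswith t ['1', '2', '3', '4', '5', '6', '7'] '1' '7' hlast rfl (by decide)]
          simp
      · -- c = '2'
        rw [show (('2'.toNat : Int) - 48) = ((2 : Nat) : Int) from by decide]
        rw [if_pos (show (1:Int) ≤ ((2:Nat):Int) ∧ ((2:Nat):Int) ≤ 7 from by norm_num)]
        rw [PySem.List.slice_from_neg_natCast t 2 (by norm_num),
          PySem.List.slice_to_neg_natCast t 2 (by norm_num),
          show PySem.List.slice "1234567".toList none (some ((2:Nat):Int)) = ['1', '2'] from by decide,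
          Int.toNat_natCast]
        by_cases hE : PySem.Chars.endswith t ['1', '2'] = true
        · have hdrop : t.drop (t.length - 2) = ['1', '2'] := by
            simpa using (endswith_iff_drop t ['1', '2'] (by decide)).mp hE
          rw [if_pos hdrop]
          have hlen : 2 ≤ t.length := by simpa using endswith_le t ['1', '2'] hE
          have hs1 : PySem.List.slice t none (some ((t.length : Int) - 2)) = t.take (t.length - 2) := by
            have h := slice_take t 2 hlen; push_cast at h; exact h
          simp only [tokenize_stepA, hE, hs1,
            not_endswith t ['1'] '2' '1' hlast rfl (by decide),
            not_endswith t ['1', '2', '3'] '2' '3' hlast rfl (by decide),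
            not_endswith t ['1', '2', '3', '4'] '2' '4' hlast rfl (by decide),
            not_endswith t ['1', '2', '3', '4', '5'] '2' '5' hlast rfl (by decide),
            not_endswith t ['1', '2', '3', '4', '5', '6'] '2' '6' hlast rfl (by decide),
            not_endswith t ['1', '2', '3', '4', '5', '6', '7'] '2' '7' hlast rfl (by decide)]
          simp [List.replicate]
        · rw [Bool.not_eq_true] at hE
          have hdropne : ¬ (t.drop (t.length - 2) = ['1', '2']) := by
            intro hcontra
            have : PySem.Chars.endswith t ['1', '2'] = true :=
              (endswith_iff_drop t ['1', '2'] (by decide)).mpr (by simpa using hcontra)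
            simp [this] at hE
          rw [if_neg hdropne]
          simp only [tokenize_stepA, hE,
            not_endswith t ['1'] '2' '1' hlast rfl (by decide),
            not_endswith t ['1', '2', '3'] '2' '3' hlast rfl (by decide),
            not_endswith t ['1', '2', '3', '4'] '2' '4' hlast rfl (by decide),
            not_endswith t ['1', '2', '3', '4', '5'] '2' '5' hlast rfl (by decide),
            not_endswith t ['1', '2', '3', '4', '5', '6'] '2' '6' hlast rfl (by decide),
            not_endswith t ['1', '2', '3', '4', '5', '6', '7'] '2' '7' hlast rfl (by decide)]
          simp
      · -- c = '3'
        rw [show (('3'.toNat : Int) - 48) = ((3 : Nat) : Int) from by decide]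
        rw [if_pos (show (1:Int) ≤ ((3:Nat):Int) ∧ ((3:Nat):Int) ≤ 7 from by norm_num)]
        rw [PySem.List.slice_from_neg_natCast t 3 (by norm_num),
          PySem.List.slice_to_neg_natCast t 3 (by norm_num),
          show PySem.List.slice "1234567".toList none (some ((3:Nat):Int)) = ['1', '2', '3'] from by decide,
          Int.toNat_natCast]
        by_cases hE : PySem.Chars.endswith t ['1', '2', '3'] = true
        · have hdrop : t.drop (t.length - 3) = ['1', '2', '3'] := by
            simpa using (endswith_iff_drop t ['1', '2', '3'] (by decide)).mp hE
          rw [if_pos hdrop]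
          have hlen : 3 ≤ t.length := by simpa using endswith_le t ['1', '2', '3'] hE
          have hs1 : PySem.List.slice t none (some ((t.length : Int) - 3)) = t.take (t.length - 3) := by
            have h := slice_take t 3 hlen; push_cast at h; exact h
          simp only [tokenize_stepA, hE, hs1,
            not_endswith t ['1'] '3' '1' hlast rfl (by decide),
            not_endswith t ['1', '2'] '3' '2' hlast rfl (by decide),
            not_endswith t ['1', '2', '3', '4'] '3' '4' hlast rfl (by decide),
            not_endswith t ['1', '2', '3', '4', '5'] '3' '5' hlast rfl (by decide),
            not_endswith t ['1', '2', '3', '4', '5', '6'] '3' '6' hlast rfl (by decide),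
            not_endswith t ['1', '2', '3', '4', '5', '6', '7'] '3' '7' hlast rfl (by decide)]
          simp [List.replicate]
        · rw [Bool.not_eq_true] at hE
          have hdropne : ¬ (t.drop (t.length - 3) = ['1', '2', '3']) := by
            intro hcontra
            have : PySem.Chars.endswith t ['1', '2', '3'] = true :=
              (endswith_iff_drop t ['1', '2', '3'] (by decide)).mpr (by simpa using hcontra)
            simp [this] at hE
          rw [if_neg hdropne]
          simp only [tokenize_stepA, hE,
            not_endswith t ['1'] '3' '1' hlast rfl (by decide),
            not_endswith t ['1', '2'] '3' '2' hlast rfl (by decide),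
            not_endswith t ['1', '2', '3', '4'] '3' '4' hlast rfl (by decide),
            not_endswith t ['1', '2', '3', '4', '5'] '3' '5' hlast rfl (by decide),
            not_endswith t ['1', '2', '3', '4', '5', '6'] '3' '6' hlast rfl (by decide),
            not_endswith t ['1', '2', '3', '4', '5', '6', '7'] '3' '7' hlast rfl (by decide)]
          simp
      · -- c = '4'
        rw [show (('4'.toNat : Int) - 48) = ((4 : Nat) : Int) from by decide]
        rw [if_pos (show (1:Int) ≤ ((4:Nat):Int) ∧ ((4:Nat):Int) ≤ 7 from by norm_num)]
        rw [PySem.List.slice_from_neg_natCast t 4 (by norm_num),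
          PySem.List.slice_to_neg_natCast t 4 (by norm_num),
          show PySem.List.slice "1234567".toList none (some ((4:Nat):Int)) = ['1', '2', '3', '4'] from by decide,
          Int.toNat_natCast]
        by_cases hE : PySem.Chars.endswith t ['1', '2', '3', '4'] = true
        · have hdrop : t.drop (t.length - 4) = ['1', '2', '3', '4'] := by
            simpa using (endswith_iff_drop t ['1', '2', '3', '4'] (by decide)).mp hE
          rw [if_pos hdrop]
          have hlen : 4 ≤ t.length := by simpa using endswith_le t ['1', '2', '3', '4'] hE
          have hs1 : PySem.List.slice t none (some ((t.length : Int) - 4)) = t.take (t.length - 4) := by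
            have h := slice_take t 4 hlen; push_cast at h; exact h
          simp only [tokenize_stepA, hE, hs1,
            not_endswith t ['1'] '4' '1' hlast rfl (by decide),
            not_endswith t ['1', '2'] '4' '2' hlast rfl (by decide),
            not_endswith t ['1', '2', '3'] '4' '3' hlast rfl (by decide),
            not_endswith t ['1', '2', '3', '4', '5'] '4' '5' hlast rfl (by decide),
            not_endswith t ['1', '2', '3', '4', '5', '6'] '4' '6' hlast rfl (by decide),
            not_endswith t ['1', '2', '3', '4', '5', '6', '7'] '4' '7' hlast rfl (by decide)]
          simp [List.replicate]
        · rw [Bool.not_eq_true] at hE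
          have hdropne : ¬ (t.drop (t.length - 4) = ['1', '2', '3', '4']) := by
            intro hcontra
            have : PySem.Chars.endswith t ['1', '2', '3', '4'] = true :=
              (endswith_iff_drop t ['1', '2', '3', '4'] (by decide)).mpr (by simpa using hcontra)
            simp [this] at hE
          rw [if_neg hdropne]
          simp only [tokenize_stepA, hE,
            not_endswith t ['1'] '4' '1' hlast rfl (by decide),
            not_endswith t ['1', '2'] '4' '2' hlast rfl (by decide),
            not_endswith t ['1', '2', '3'] '4' '3' hlast rfl (by decide),
            not_endswith t ['1', '2', '3', '4', '5'] '4' '5' hlast rfl (by decide),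
            not_endswith t ['1', '2', '3', '4', '5', '6'] '4' '6' hlast rfl (by decide),
            not_endswith t ['1', '2', '3', '4', '5', '6', '7'] '4' '7' hlast rfl (by decide)]
          simp
      · -- c = '5'
        rw [show (('5'.toNat : Int) - 48) = ((5 : Nat) : Int) from by decide]
        rw [if_pos (show (1:Int) ≤ ((5:Nat):Int) ∧ ((5:Nat):Int) ≤ 7 from by norm_num)]
        rw [PySem.List.slice_from_neg_natCast t 5 (by norm_num),
          PySem.List.slice_to_neg_natCast t 5 (by norm_num),
          show PySem.List.slice "1234567".toList none (some ((5:Nat):Int)) = ['1', '2', '3', '4', '5'] from by decide,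
          Int.toNat_natCast]
        by_cases hE : PySem.Chars.endswith t ['1', '2', '3', '4', '5'] = true
        · have hdrop : t.drop (t.length - 5) = ['1', '2', '3', '4', '5'] := by
            simpa using (endswith_iff_drop t ['1', '2', '3', '4', '5'] (by decide)).mp hE
          rw [if_pos hdrop]
          have hlen : 5 ≤ t.length := by simpa using endswith_le t ['1', '2', '3', '4', '5'] hE
          have hs1 : PySem.List.slice t none (some ((t.length : Int) - 5)) = t.take (t.length - 5) := by
            have h := slice_take t 5 hlen; push_cast at h; exact h
          simp only [tokenize_stepA, hE, hs1,
            not_endswith t ['1'] '5' '1' hlast rfl (by decide),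
            not_endswith t ['1', '2'] '5' '2' hlast rfl (by decide),
            not_endswith t ['1', '2', '3'] '5' '3' hlast rfl (by decide),
            not_endswith t ['1', '2', '3', '4'] '5' '4' hlast rfl (by decide),
            not_endswith t ['1', '2', '3', '4', '5', '6'] '5' '6' hlast rfl (by decide),
            not_endswith t ['1', '2', '3', '4', '5', '6', '7'] '5' '7' hlast rfl (by decide)]
          simp [List.replicate]
        · rw [Bool.not_eq_true] at hE
          have hdropne : ¬ (t.drop (t.length - 5) = ['1', '2', '3', '4', '5']) := by
            intro hcontra
            have : PySem.Chars.endswith t ['1', '2', '3', '4', '5'] = true :=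
              (endswith_iff_drop t ['1', '2', '3', '4', '5'] (by decide)).mpr (by simpa using hcontra)
            simp [this] at hE
          rw [if_neg hdropne]
          simp only [tokenize_stepA, hE,
            not_endswith t ['1'] '5' '1' hlast rfl (by decide),
            not_endswith t ['1', '2'] '5' '2' hlast rfl (by decide),
            not_endswith t ['1', '2', '3'] '5' '3' hlast rfl (by decide),
            not_endswith t ['1', '2', '3', '4'] '5' '4' hlast rfl (by decide),
            not_endswith t ['1', '2', '3', '4', '5', '6'] '5' '6' hlast rfl (by decide),
            not_endswith t ['1', '2', '3', '4', '5', '6', '7'] '5' '7' hlast rfl (by decide)]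
          simp
      · -- c = '6'
        rw [show (('6'.toNat : Int) - 48) = ((6 : Nat) : Int) from by decide]
        rw [if_pos (show (1:Int) ≤ ((6:Nat):Int) ∧ ((6:Nat):Int) ≤ 7 from by norm_num)]
        rw [PySem.List.slice_from_neg_natCast t 6 (by norm_num),
          PySem.List.slice_to_neg_natCast t 6 (by norm_num),
          show PySem.List.slice "1234567".toList none (some ((6:Nat):Int)) = ['1', '2', '3', '4', '5', '6'] from by decide,
          Int.toNat_natCast]
        by_cases hE : PySem.Chars.endswith t ['1', '2', '3', '4', '5', '6'] = true
        · have hdrop : t.drop (t.length - 6) = ['1', '2', '3', '4', '5', '6'] := by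
            simpa using (endswith_iff_drop t ['1', '2', '3', '4', '5', '6'] (by decide)).mp hE
          rw [if_pos hdrop]
          have hlen : 6 ≤ t.length := by simpa using endswith_le t ['1', '2', '3', '4', '5', '6'] hE
          have hs1 : PySem.List.slice t none (some ((t.length : Int) - 6)) = t.take (t.length - 6) := by
            have h := slice_take t 6 hlen; push_cast at h; exact h
          simp only [tokenize_stepA, hE, hs1,
            not_endswith t ['1'] '6' '1' hlast rfl (by decide),
            not_endswith t ['1', '2'] '6' '2' hlast rfl (by decide),
            not_endswith t ['1', '2', '3'] '6' '3' hlast rfl (by decide),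
            not_endswith t ['1', '2', '3', '4'] '6' '4' hlast rfl (by decide),
            not_endswith t ['1', '2', '3', '4', '5'] '6' '5' hlast rfl (by decide),
            not_endswith t ['1', '2', '3', '4', '5', '6', '7'] '6' '7' hlast rfl (by decide)]
          simp [List.replicate]
        · rw [Bool.not_eq_true] at hE
          have hdropne : ¬ (t.drop (t.length - 6) = ['1', '2', '3', '4', '5', '6']) := by
            intro hcontra
            have : PySem.Chars.endswith t ['1', '2', '3', '4', '5', '6'] = true :=
              (endswith_iff_drop t ['1', '2', '3', '4', '5', '6'] (by decide)).mpr (by simpa using hcontra)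
            simp [this] at hE
          rw [if_neg hdropne]
          simp only [tokenize_stepA, hE,
            not_endswith t ['1'] '6' '1' hlast rfl (by decide),
            not_endswith t ['1', '2'] '6' '2' hlast rfl (by decide),
            not_endswith t ['1', '2', '3'] '6' '3' hlast rfl (by decide),
            not_endswith t ['1', '2', '3', '4'] '6' '4' hlast rfl (by decide),
            not_endswith t ['1', '2', '3', '4', '5'] '6' '5' hlast rfl (by decide),
            not_endswith t ['1', '2', '3', '4', '5', '6', '7'] '6' '7' hlast rfl (by decide)]
          simp
      · -- c = '7'
        rw [show (('7'.toNat : Int) - 48) = ((7 : Nat) : Int) from by decide]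
        rw [if_pos (show (1:Int) ≤ ((7:Nat):Int) ∧ ((7:Nat):Int) ≤ 7 from by norm_num)]
        rw [PySem.List.slice_from_neg_natCast t 7 (by norm_num),
          PySem.List.slice_to_neg_natCast t 7 (by norm_num),
          show PySem.List.slice "1234567".toList none (some ((7:Nat):Int)) = ['1', '2', '3', '4', '5', '6', '7'] from by decide,
          Int.toNat_natCast]
        by_cases hE : PySem.Chars.endswith t ['1', '2', '3', '4', '5', '6', '7'] = true
        · have hdrop : t.drop (t.length - 7) = ['1', '2', '3', '4', '5', '6', '7'] := by
            simpa using (endswith_iff_drop t ['1', '2', '3', '4', '5', '6', '7'] (by decide)).mp hE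
          rw [if_pos hdrop]
          have hlen : 7 ≤ t.length := by simpa using endswith_le t ['1', '2', '3', '4', '5', '6', '7'] hE
          have hs1 : PySem.List.slice t none (some ((t.length : Int) - 7)) = t.take (t.length - 7) := by
            have h := slice_take t 7 hlen; push_cast at h; exact h
          simp only [tokenize_stepA, hE, hs1,
            not_endswith t ['1'] '7' '1' hlast rfl (by decide),
            not_endswith t ['1', '2'] '7' '2' hlast rfl (by decide),
            not_endswith t ['1', '2', '3'] '7' '3' hlast rfl (by decide),
            not_endswith t ['1', '2', '3', '4'] '7' '4' hlast rfl (by decide),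
            not_endswith t ['1', '2', '3', '4', '5'] '7' '5' hlast rfl (by decide),
            not_endswith t ['1', '2', '3', '4', '5', '6'] '7' '6' hlast rfl (by decide)]
          simp [List.replicate]
        · rw [Bool.not_eq_true] at hE
          have hdropne : ¬ (t.drop (t.length - 7) = ['1', '2', '3', '4', '5', '6', '7']) := by
            intro hcontra
            have : PySem.Chars.endswith t ['1', '2', '3', '4', '5', '6', '7'] = true :=
              (endswith_iff_drop t ['1', '2', '3', '4', '5', '6', '7'] (by decide)).mpr (by simpa using hcontra)
            simp [this] at hE
          rw [if_neg hdropne]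
          simp only [tokenize_stepA, hE,
            not_endswith t ['1'] '7' '1' hlast rfl (by decide),
            not_endswith t ['1', '2'] '7' '2' hlast rfl (by decide),
            not_endswith t ['1', '2', '3'] '7' '3' hlast rfl (by decide),
            not_endswith t ['1', '2', '3', '4'] '7' '4' hlast rfl (by decide),
            not_endswith t ['1', '2', '3', '4', '5'] '7' '5' hlast rfl (by decide),
            not_endswith t ['1', '2', '3', '4', '5', '6'] '7' '6' hlast rfl (by decide)]
          simp
    · -- last char not a digit 1..7: both sides empty
      have hne1 : c ≠ '1' := by rintro rfl; exact hr (by decide)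
      have hne2 : c ≠ '2' := by rintro rfl; exact hr (by decide)
      have hne3 : c ≠ '3' := by rintro rfl; exact hr (by decide)
      have hne4 : c ≠ '4' := by rintro rfl; exact hr (by decide)
      have hne5 : c ≠ '5' := by rintro rfl; exact hr (by decide)
      have hne6 : c ≠ '6' := by rintro rfl; exact hr (by decide)
      have hne7 : c ≠ '7' := by rintro rfl; exact hr (by decide)
      have hguard : ¬ (1 ≤ (c.toNat : Int) - 48 ∧ (c.toNat : Int) - 48 ≤ 7) := by
        intro hcontra
        have h49 : 49 ≤ c.toNat := by omega
        have h55 : c.toNat ≤ 55 := by omega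
        exact hr ⟨h49, h55⟩
      simp [tokenize_stepA, hguard,
        not_endswith t ['1'] c '1' hlast rfl hne1,
        not_endswith t ['1','2'] c '2' hlast rfl hne2,
        not_endswith t ['1','2','3'] c '3' hlast rfl hne3,
        not_endswith t ['1','2','3','4'] c '4' hlast rfl hne4,
        not_endswith t ['1','2','3','4','5'] c '5' hlast rfl hne5,
        not_endswith t ['1','2','3','4','5','6'] c '6' hlast rfl hne6,
        not_endswith t ['1','2','3','4','5','6','7'] c '7' hlast rfl hne7]
      intro l h1 h2 _ _ _
      exact absurd ⟨h1, by omega⟩ hguard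

-- flatten/flatMap/map commutations
theorem flatten_flatMap {α β : Type} (g : α → List (List β)) (l : List α) :
    (l.flatMap g).flatten = l.flatMap (fun x => (g x).flatten) := by
  induction l with
  | nil => rfl
  | cons a rest ih => simp [List.flatMap_cons, ih]

theorem map_flatMap' {α β γ : Type} (g : β → γ) (u : α → List β) (l : List α) :
    (l.flatMap u).map g = l.flatMap (fun x => (u x).map g) := by
  induction l with
  | nil => rfl
  | cons a rest ih => simp [List.flatMap_cons, ih]

-- each unit ends with '|', so the joined string's last char is the trailing '|'
theorem dropLast_units (U : List (List Char)) :
    ((U.map (· ++ ['|'])).flatten).dropLast = PySem.Chars.join ['|'] U := by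
  induction U with
  | nil => simp [PySem.Chars.join_nil]
  | cons p rest ih =>
    cases rest with
    | nil =>
      simp only [List.map_cons, List.map_nil, List.flatten_cons, List.flatten_nil,
        List.append_nil, List.dropLast_concat, PySem.Chars.join_singleton]
    | cons q rest' =>
      rw [PySem.Chars.join_cons_cons, ← ih, List.map_cons, List.flatten_cons,
        List.dropLast_append, if_neg (by simp)]

-- xs[:len-1] = dropLast
theorem slice_len_sub_one (res : List Char) :
    PySem.List.slice res none (some ((res.length : Int) - 1)) = res.dropLast := by
  cases res with
  | nil => rfl
  | cons a l =>
    have h1 : (1 : Nat) ≤ (a :: l).length := by simp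
    have := slice_take (a :: l) 1 h1
    simp only [Nat.cast_one] at this
    rw [this, List.dropLast_eq_take]

-- ===== VERDICT (by name: the statement is the Claim_ definition above) =====
theorem tokenize_cards_rows_spec : Claim_equal_tokenize_cards_rows := by
  intro cards _
  unfold Spec_tokenize_cards_rows tokenize_cards_rows tokenize_cards_rows_alt
  dsimp only
  rw [splitOn_eq_splitT, scan_eq_splitT]
  set L := splitT [] cards.toList with hL
  -- A side: fold with guard, then flatMap
  rw [← PySem.List.foldl_if_eq_foldl_filter (fun t => !t.isEmpty) tokenize_stepA]
  have hA : L.foldl (fun acc t => if !t.isEmpty then tokenize_stepA acc t else acc) [] =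
      L.flatMap (fun t => if !t.isEmpty then tokenize_stepA [] t else []) := by
    rw [PySem.List.foldl_congr_mem L _
      (fun acc t => acc ++ (if !t.isEmpty then tokenize_stepA [] t else []))]
    · exact PySem.List.foldl_append_eq_flatMap _ L []
    · intro acc t _
      by_cases h : t.isEmpty
      · simp [h]
      · simp only [h, Bool.not_false, if_pos]
        exact stepA_append acc t
  have hB : L.foldl tokenize_emitB [] = L.flatMap (fun t => tokenize_emitB [] t) := by
    rw [PySem.List.foldl_congr_mem L _ (fun acc t => acc ++ tokenize_emitB [] t)]
    · exact PySem.List.foldl_append_eq_flatMap _ L []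
    · intro acc t _; exact emitB_append acc t
  rw [hA, hB]
  -- join [] = flatten, then per-token flattening
  have hjoin : ∀ (F : List (List Char)), PySem.Chars.join [] F = F.flatten := by
    intro F
    induction F with
    | nil => rfl
    | cons p rest ih =>
      cases rest with
      | nil => simp [PySem.Chars.join_singleton]
      | cons q rest' =>
        rw [PySem.Chars.join_cons_cons]
        simp only [List.flatten_cons] at ih ⊢
        rw [ih]
        simp
  rw [hjoin, slice_len_sub_one, flatten_flatMap]
  have := funext tokflat
  rw [show (fun t => ((if !t.isEmpty then tokenize_stepA [] t else []) : List (List Char)).flatten)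
      = (fun t => (((tokenize_emitB [] t).map (· ++ ['|'])).flatten : List Char)) from funext tokflat]
  rw [show (L.flatMap fun t => ((tokenize_emitB [] t).map (· ++ ['|'])).flatten)
      = ((L.flatMap fun t => tokenize_emitB [] t).map (· ++ ['|'])).flatten from ?_]
  · rw [dropLast_units]
  · rw [map_flatMap', flatten_flatMap]
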